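-- pv_equiv track=rewrite | github.com/zmwangx/Project-Euler | 143/solution.py | search_pseudo_pythagorean_triples
-- ===== SOURCE A (Python) =====
-- import math
--
-- def search_pseudo_pythagorean_triples(LIMIT):
--     triples = set()
--     # Case 1.
--     for n in range(2, int(math.sqrt(LIMIT))):
--         for m in range(1, n):
--             x0 = n * n - m * m
--             y0 = m * (2 * n + m)
--             if (x0_y0_sum := x0 + y0) >= LIMIT:
--                 break
--             if x0 > y0:
--                 continue
--             if math.gcd(m, n) != 1:
--                 continue
--             z0 = m * m + n * n + m * n
--             for l in range(1, int((LIMIT - 1) / x0_y0_sum) + 1):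
--                 triples.add((x0 * l, y0 * l, z0 * l))
--     # Case 2.
--     for n in range(2, int(math.sqrt(LIMIT * 4 / 3)) + 1):
--         for m in range(int(n / 2) + 1, n):
--             x0 = n * n - m * m
--             y0 = n * (2 * m - n)
--             if (x0_y0_sum := x0 + y0) >= LIMIT:
--                 continue
--             if x0 > y0:
--                 continue
--             if math.gcd(m, n) != 1:
--                 continue
--             z0 = m * m + n * n - m * n
--             for l in range(1, int((LIMIT - 1) / x0_y0_sum) + 1):
--                 triples.add((x0 * l, y0 * l, z0 * l))
--     return sorted(triples)
-- ===== SOURCE B (Python) =====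
-- import math
--
-- def search_pseudo_pythagorean_triples(LIMIT):
--     # Single sweep over the primitive parametrization: for coprime m < n with
--     # n - m not divisible by 3, (n^2-m^2, 2mn+m^2, n^2+mn+m^2) (legs ordered with
--     # min/max) is a primitive 120-degree triple; scale it by every l that keeps
--     # the leg sum below LIMIT.  One family replaces A's two cases.
--     triples = set()
--     n = 2
--     while n * n + 2 * n < LIMIT:
--         for m in range(1, n):
--             s = n * n + 2 * m * n
--             if s >= LIMIT:
--                 break
--             if (n - m) % 3 != 0 and math.gcd(m, n) == 1:
--                 x0 = n * n - m * m
--                 y0 = 2 * m * n + m * m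
--                 z0 = n * n + m * n + m * m
--                 a0, b0 = min(x0, y0), max(x0, y0)
--                 for l in range(1, (LIMIT - 1) // s + 1):
--                     triples.add((a0 * l, b0 * l, z0 * l))
--         n += 1
--     return sorted(triples)
-- ===== Notes on version B (the rewrite author's own statement) =====
-- stated objective: simpler
-- what changed: B replaces A's two separate (m,n)-parametrization sweeps (each with its own range bounds, ordering filter and scaling loop) by a single sweep over the primitive-triple family (coprime m<n with n-m not divisible by 3, legs ordered via min/max) scaled by l, so the second case and its overlap with the first disappear.
import Mathlib
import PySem

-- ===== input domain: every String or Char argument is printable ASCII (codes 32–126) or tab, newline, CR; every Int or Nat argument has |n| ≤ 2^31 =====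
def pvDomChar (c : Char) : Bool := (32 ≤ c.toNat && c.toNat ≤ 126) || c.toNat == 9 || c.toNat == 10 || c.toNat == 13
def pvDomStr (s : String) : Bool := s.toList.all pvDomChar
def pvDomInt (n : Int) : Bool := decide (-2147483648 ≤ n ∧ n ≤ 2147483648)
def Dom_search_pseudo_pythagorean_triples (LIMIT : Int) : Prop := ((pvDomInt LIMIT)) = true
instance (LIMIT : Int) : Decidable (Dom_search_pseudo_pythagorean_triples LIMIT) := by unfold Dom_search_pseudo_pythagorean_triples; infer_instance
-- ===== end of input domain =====

-- B replaces A's two parametrization sweeps and their overlap handling by ONE primitive-family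
-- sweep (coprime m<n with 3 ∤ n-m, legs ordered by min/max) scaled by l; equality of the returned
-- list is proved for every LIMIT ≥ 0 (Python A raises ValueError on LIMIT < 0).

-- ===== PORT A =====
-- Python compares equal-length int 3-tuples lexicographically; Prod.Lex on Int is exactly that
-- comparison, so sorted(...) is ported as PySem.List.sorted with this (injective) key.
def pvKey (t : Int × Int × Int) : Lex (Int × Lex (Int × Int)) := toLex (t.1, toLex (t.2.1, t.2.2))

-- Case 1 inner loop over m (`for m in range(1, n)`), with its `break`.
-- int((LIMIT - 1) / s) with 0 < s ≤ LIMIT - 1 ≤ 2^31 is exact float arithmetic = (LIMIT-1)//s.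
def pvA1 (LIMIT n : Int) : List Int → PySem.Set (Int × Int × Int) → PySem.Set (Int × Int × Int)
  | [], s => s
  | m :: ms, s =>
    -- x0 = n*n - m*m, y0 = m*(2*n + m), x0_y0_sum = x0 + y0 (inlined below)
    if LIMIT ≤ (n * n - m * m) + m * (2 * n + m) then s
    else if m * (2 * n + m) < n * n - m * m then pvA1 LIMIT n ms s
    else if (Int.gcd m n : Int) ≠ 1 then pvA1 LIMIT n ms s
    else pvA1 LIMIT n ms
      ((PySem.List.pyRange 1 (PySem.Int.floordiv (LIMIT - 1) ((n * n - m * m) + m * (2 * n + m)) + 1)).foldl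
        (fun acc l => PySem.Set.add acc ((n * n - m * m) * l, (m * (2 * n + m)) * l, (m * m + n * n + m * n) * l)) s)

-- Case 2 body for one m (`continue` = return s unchanged).
def pvA2body (LIMIT n : Int) (s : PySem.Set (Int × Int × Int)) (m : Int) : PySem.Set (Int × Int × Int) :=
  -- x0 = n*n - m*m, y0 = n*(2*m - n), x0_y0_sum = x0 + y0 (inlined below)
  if LIMIT ≤ (n * n - m * m) + n * (2 * m - n) then s
  else if n * (2 * m - n) < n * n - m * m then s
  else if (Int.gcd m n : Int) ≠ 1 then s
  else (PySem.List.pyRange 1 (PySem.Int.floordiv (LIMIT - 1) ((n * n - m * m) + n * (2 * m - n)) + 1)).foldl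
    (fun acc l => PySem.Set.add acc ((n * n - m * m) * l, (n * (2 * m - n)) * l, (m * m + n * n - m * n) * l)) s

-- the `triples` set after both sweeps; for 0 ≤ LIMIT ≤ 2^31 the doubles are exact:
-- int(math.sqrt(LIMIT)) = Int.sqrt LIMIT, int(math.sqrt(LIMIT*4/3)) = Int.sqrt ((LIMIT*4)//3),
-- int(n/2) = n//2 (all arguments < 2^53, fractional parts bounded away from integers).
-- `triples` after the Case-1 sweep
def pvAset1 (LIMIT : Int) : PySem.Set (Int × Int × Int) :=
  (PySem.List.pyRange 2 (Int.sqrt LIMIT)).foldl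
    (fun s n => pvA1 LIMIT n (PySem.List.pyRange 1 n) s) PySem.Set.empty

-- `triples` after both sweeps
def pvAset (LIMIT : Int) : PySem.Set (Int × Int × Int) :=
  (PySem.List.pyRange 2 (Int.sqrt (PySem.Int.floordiv (LIMIT * 4) 3) + 1)).foldl
    (fun s n => (PySem.List.pyRange (PySem.Int.floordiv n 2 + 1) n).foldl (pvA2body LIMIT n) s)
    (pvAset1 LIMIT)

def search_pseudo_pythagorean_triples (LIMIT : Int) : List (Int × Int × Int) :=
  PySem.List.sorted (pvAset LIMIT) pvKey

-- ===== PORT B =====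
-- inner loop `for m in range(1, n)` with its `break`; math.isqrt = Int.sqrt on nonneg ints (exact).
def pvB1 (LIMIT n : Int) : List Int → PySem.Set (Int × Int × Int) → PySem.Set (Int × Int × Int)
  | [], s => s
  | m :: ms, s =>
    -- s = n*n + 2*m*n; x0 = n*n - m*m, y0 = 2*m*n + m*m, z0 = n*n + m*n + m*m,
    -- a0 = min(x0, y0), b0 = max(x0, y0) (inlined below)
    if LIMIT ≤ n * n + 2 * m * n then s
    else if PySem.Int.mod (n - m) 3 ≠ 0 ∧ (Int.gcd m n : Int) = 1 then
      pvB1 LIMIT n ms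
        ((PySem.List.pyRange 1 (PySem.Int.floordiv (LIMIT - 1) (n * n + 2 * m * n) + 1)).foldl
          (fun acc l => PySem.Set.add acc (min (n * n - m * m) (2 * m * n + m * m) * l,
            max (n * n - m * m) (2 * m * n + m * m) * l, (n * n + m * n + m * m) * l)) s)
    else pvB1 LIMIT n ms s

-- the `while n * n + 2 * n < LIMIT` loop (n increases, so LIMIT - n decreases and is the measure)
def pvBmain (LIMIT n : Int) (s : PySem.Set (Int × Int × Int)) : PySem.Set (Int × Int × Int) :=
  if n * n + 2 * n < LIMIT then
    pvBmain LIMIT (n + 1) (pvB1 LIMIT n (PySem.List.pyRange 1 n) s)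
  else s
termination_by (LIMIT - n).toNat
decreasing_by
  rename_i h
  have h0 : 0 ≤ n * (n + 1) := by
    rcases le_or_gt 0 n with hn | hn
    · exact mul_nonneg hn (by omega)
    · have h1 : 0 ≤ (-n) * (-(n + 1)) := mul_nonneg (by omega) (by omega)
      nlinarith
  have h2 : n < LIMIT := by nlinarith
  omega

def pvBset (LIMIT : Int) : PySem.Set (Int × Int × Int) := pvBmain LIMIT 2 PySem.Set.empty

def search_pseudo_pythagorean_triples_alt (LIMIT : Int) : List (Int × Int × Int) :=
  PySem.List.sorted (pvBset LIMIT) pvKey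

-- ===== PRECONDITION & SPEC =====
-- Pre_ excludes exactly the inputs where Python A raises: math.sqrt(LIMIT) raises ValueError for LIMIT < 0.
def Pre_search_pseudo_pythagorean_triples (LIMIT : Int) : Prop := 0 ≤ LIMIT
instance (LIMIT : Int) : Decidable (Pre_search_pseudo_pythagorean_triples LIMIT) := by
  unfold Pre_search_pseudo_pythagorean_triples; infer_instance

def pvWitness_search_pseudo_pythagorean_triples : Int := 50

def Spec_search_pseudo_pythagorean_triples (LIMIT : Int) (out : List (Int × Int × Int)) : Prop := out = search_pseudo_pythagorean_triples_alt LIMIT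
instance (LIMIT : Int) (out : List (Int × Int × Int)) : Decidable (Spec_search_pseudo_pythagorean_triples LIMIT out) := by unfold Spec_search_pseudo_pythagorean_triples; infer_instance

-- ===== CLAIM (what is proved, stated in full; the proofs are below) =====
def Claim_equal_search_pseudo_pythagorean_triples : Prop := ∀ (LIMIT : Int), Dom_search_pseudo_pythagorean_triples LIMIT → Pre_search_pseudo_pythagorean_triples LIMIT → Spec_search_pseudo_pythagorean_triples LIMIT (search_pseudo_pythagorean_triples LIMIT)

-- ===== LEMMAS AND PROOFS =====

-- the common mathematical description of both sets: t = (a,b,c) is a 120-degree triple with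
-- 1 ≤ a ≤ b, a+b < L, c ≥ 0, c² = a² + ab + b²
def pvSP (L : Int) (t : Int × Int × Int) : Prop :=
  1 ≤ t.1 ∧ t.1 ≤ t.2.1 ∧ t.1 + t.2.1 < L ∧ 0 ≤ t.2.2 ∧
    t.2.2 * t.2.2 = t.1 * t.1 + t.1 * t.2.1 + t.2.1 * t.2.1

-- generic fold membership lemmas
theorem pv_mem_foldl_mono {α β : Type} (step : List β → α → List β) (x : β)
    (hmono : ∀ s a, x ∈ s → x ∈ step s a) :
    ∀ (l : List α) (init : List β), x ∈ init → x ∈ l.foldl step init := by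
  intro l
  induction l with
  | nil => intro init h; exact h
  | cons a l ih => intro init h; exact ih _ (hmono _ _ h)

theorem pv_mem_foldl_of {α β : Type} (step : List β → α → List β) (x : β) (a : α)
    (hmono : ∀ s a, x ∈ s → x ∈ step s a)
    (hadd : ∀ s, x ∈ step s a) :
    ∀ (l : List α) (init : List β), a ∈ l → x ∈ l.foldl step init := by
  intro l
  induction l with
  | nil => intro init h; cases h
  | cons b l ih =>
    intro init h
    rcases List.mem_cons.mp h with h | h
    · subst h; exact pv_mem_foldl_mono step x hmono l _ (hadd _)
    · exact ih _ h

theorem pv_mem_foldl_elim {α β : Type} (step : List β → α → List β) (P : α → β → Prop)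
    (hstep : ∀ s a x, x ∈ step s a → x ∈ s ∨ P a x) :
    ∀ (l : List α) (init : List β) (x : β), x ∈ l.foldl step init → x ∈ init ∨ ∃ a ∈ l, P a x := by
  intro l
  induction l with
  | nil => intro init x h; exact Or.inl h
  | cons a l ih =>
    intro init x h
    rcases ih _ _ h with h | ⟨b, hb, hP⟩
    · rcases hstep _ _ _ h with h | h
      · exact Or.inl h
      · exact Or.inr ⟨a, List.mem_cons_self .., h⟩
    · exact Or.inr ⟨b, List.mem_cons_of_mem _ hb, hP⟩

theorem pv_nodup_foldl {α β : Type} (step : List β → α → List β)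
    (h : ∀ s a, s.Nodup → (step s a).Nodup) :
    ∀ (l : List α) (init : List β), init.Nodup → (l.foldl step init).Nodup := by
  intro l
  induction l with
  | nil => intro init hi; exact hi
  | cons a l ih => intro init hi; exact ih _ (h _ _ hi)

-- membership in the innermost scaling loop (`for l in range(1, B+1): triples.add(f(l))`)
theorem pv_mem_addfold (f : Int → Int × Int × Int) (B : Int) (s : PySem.Set (Int × Int × Int))
    (x : Int × Int × Int) :
    x ∈ (PySem.List.pyRange 1 (B + 1)).foldl (fun acc l => PySem.Set.add acc (f l)) s ↔
      x ∈ s ∨ ∃ l, 1 ≤ l ∧ l ≤ B ∧ x = f l := by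
  constructor
  · intro h
    rcases pv_mem_foldl_elim _ (fun l y => y = f l)
        (by intro s' l y hy; rcases (PySem.Set.mem_add s' (f l) y).mp hy with h | h
            · exact Or.inl h
            · exact Or.inr h) _ _ _ h with h | ⟨l, hl, hx⟩
    · exact Or.inl h
    · rcases PySem.List.mem_pyRange_one.mp hl with ⟨h1, h2⟩
      exact Or.inr ⟨l, h1, by omega, hx⟩
  · intro h
    rcases h with h | ⟨l, h1, h2, hx⟩
    · exact pv_mem_foldl_mono _ _ (by intro s' l hy; exact (PySem.Set.mem_add s' (f l) x).mpr (Or.inl hy)) _ _ h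
    · exact pv_mem_foldl_of _ _ l
        (by intro s' l' hy; exact (PySem.Set.mem_add s' (f l') x).mpr (Or.inl hy))
        (by intro s'; exact (PySem.Set.mem_add s' (f l) x).mpr (Or.inr hx)) _ _
        (PySem.List.mem_pyRange_one.mpr ⟨h1, by omega⟩)

theorem pv_nodup_addfold (f : Int → Int × Int × Int) (B : Int) (s : PySem.Set (Int × Int × Int))
    (hs : s.Nodup) :
    ((PySem.List.pyRange 1 (B + 1)).foldl (fun acc l => PySem.Set.add acc (f l)) s).Nodup :=
  pv_nodup_foldl _ (by intro s' l h; exact PySem.Set.nodup_add s' (f l) h) _ _ hs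

-- guard predicates extracted from the loops (A case 1, A case 2, B)
def pvG1 (L n m l : Int) : Prop :=
  (n * n - m * m) + m * (2 * n + m) < L ∧ n * n - m * m ≤ m * (2 * n + m) ∧
    (Int.gcd m n : Int) = 1 ∧ 1 ≤ l ∧
    l ≤ PySem.Int.floordiv (L - 1) ((n * n - m * m) + m * (2 * n + m))

def pvT1 (n m l : Int) : Int × Int × Int :=
  ((n * n - m * m) * l, (m * (2 * n + m)) * l, (m * m + n * n + m * n) * l)

def pvG2 (L n m l : Int) : Prop :=
  (n * n - m * m) + n * (2 * m - n) < L ∧ n * n - m * m ≤ n * (2 * m - n) ∧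
    (Int.gcd m n : Int) = 1 ∧ 1 ≤ l ∧
    l ≤ PySem.Int.floordiv (L - 1) ((n * n - m * m) + n * (2 * m - n))

def pvT2 (n m l : Int) : Int × Int × Int :=
  ((n * n - m * m) * l, (n * (2 * m - n)) * l, (m * m + n * n - m * n) * l)

def pvGB (L n m l : Int) : Prop :=
  n * n + 2 * m * n < L ∧ PySem.Int.mod (n - m) 3 ≠ 0 ∧ (Int.gcd m n : Int) = 1 ∧ 1 ≤ l ∧
    l ≤ PySem.Int.floordiv (L - 1) (n * n + 2 * m * n)

def pvTB (n m l : Int) : Int × Int × Int :=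
  (min (n * n - m * m) (2 * m * n + m * m) * l, max (n * n - m * m) (2 * m * n + m * m) * l,
    (n * n + m * n + m * m) * l)

-- what membership in each whole set means
def pvMA (L : Int) (x : Int × Int × Int) : Prop :=
  (∃ n m l, 2 ≤ n ∧ n < Int.sqrt L ∧ 1 ≤ m ∧ m < n ∧ pvG1 L n m l ∧ x = pvT1 n m l) ∨
  (∃ n m l, 2 ≤ n ∧ n ≤ Int.sqrt (PySem.Int.floordiv (L * 4) 3) ∧
    PySem.Int.floordiv n 2 + 1 ≤ m ∧ m < n ∧ pvG2 L n m l ∧ x = pvT2 n m l)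

def pvMB (L : Int) (x : Int × Int × Int) : Prop :=
  ∃ n m l, 1 ≤ m ∧ m < n ∧ pvGB L n m l ∧ x = pvTB n m l

theorem pv_floordiv_pos_den (a b : Int) (hb : 0 < b) : PySem.Int.floordiv a b = a / b := by
  unfold PySem.Int.floordiv
  rw [Int.fdiv_eq_ediv]
  simp [le_of_lt hb]

theorem pv_le_floordiv_iff {l A s : Int} (hs : 0 < s) :
    l ≤ PySem.Int.floordiv A s ↔ l * s ≤ A := by
  unfold PySem.Int.floordiv
  rw [Int.fdiv_eq_ediv]
  simp only [le_of_lt hs, true_or, if_pos, sub_zero]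
  exact Int.le_ediv_iff_mul_le hs

theorem le_sqrt_of_sq_le {x y : Int} (hx : 0 ≤ x) (h : x * x ≤ y) : x ≤ Int.sqrt y := by
  unfold Int.sqrt
  have hxx : (x.toNat : Int) = x := Int.toNat_of_nonneg hx
  have h2 : x.toNat * x.toNat ≤ y.toNat := by
    have : (↑(x.toNat * x.toNat) : Int) ≤ ↑y.toNat := by push_cast [hxx]; omega
    exact_mod_cast this
  have := Nat.le_sqrt.mpr h2
  omega

-- ---------- A-side loop characterization ----------

theorem pvA1_mono (L n : Int) (ms : List Int) (s : PySem.Set (Int × Int × Int))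
    (x : Int × Int × Int) (h : x ∈ s) : x ∈ pvA1 L n ms s := by
  induction ms generalizing s with
  | nil => exact h
  | cons m ms ih =>
    unfold pvA1
    split
    · exact h
    · split
      · exact ih _ h
      · split
        · exact ih _ h
        · exact ih _ ((pv_mem_addfold _ _ _ _).mpr (Or.inl h))

theorem pvA1_sound (L n : Int) (ms : List Int) (s : PySem.Set (Int × Int × Int))
    (x : Int × Int × Int) (h : x ∈ pvA1 L n ms s) :
    x ∈ s ∨ ∃ m ∈ ms, ∃ l,
      (n * n - m * m) + m * (2 * n + m) < L ∧ n * n - m * m ≤ m * (2 * n + m) ∧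
      (Int.gcd m n : Int) = 1 ∧ 1 ≤ l ∧
      l ≤ PySem.Int.floordiv (L - 1) ((n * n - m * m) + m * (2 * n + m)) ∧ x = pvT1 n m l := by
  induction ms generalizing s with
  | nil => exact Or.inl h
  | cons m ms ih =>
    unfold pvA1 at h
    split at h
    · exact Or.inl h
    · rename_i hbr
      split at h
      · rcases ih _ h with h | ⟨m', hm', rest⟩
        · exact Or.inl h
        · exact Or.inr ⟨m', List.mem_cons_of_mem _ hm', rest⟩
      · split at h
        · rcases ih _ h with h | ⟨m', hm', rest⟩
          · exact Or.inl h
          · exact Or.inr ⟨m', List.mem_cons_of_mem _ hm', rest⟩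
        · rename_i hxy hgcd
          rcases ih _ h with h | ⟨m', hm', rest⟩
          · rcases (pv_mem_addfold _ _ _ _).mp h with h | ⟨l, h1, h2, hx⟩
            · exact Or.inl h
            · exact Or.inr ⟨m, List.mem_cons_self .., l, by omega, by omega, by omega, h1, h2,
                by simpa [pvT1] using hx⟩
          · exact Or.inr ⟨m', List.mem_cons_of_mem _ hm', rest⟩

theorem pvA1_complete (L n m l : Int) (h2n : 2 ≤ n) (hm1 : 1 ≤ m) (hmn : m < n)
    (hsum : (n * n - m * m) + m * (2 * n + m) < L)
    (hxy : n * n - m * m ≤ m * (2 * n + m))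
    (hg : (Int.gcd m n : Int) = 1) (hl : 1 ≤ l)
    (hlb : l ≤ PySem.Int.floordiv (L - 1) ((n * n - m * m) + m * (2 * n + m))) :
    ∀ (j : Int) (s : PySem.Set (Int × Int × Int)), 1 ≤ j → j ≤ m →
      pvT1 n m l ∈ pvA1 L n (PySem.List.pyRange j n) s := by
  have key : ∀ (k : Nat) (j : Int) (s : PySem.Set (Int × Int × Int)), (m - j).toNat = k →
      1 ≤ j → j ≤ m → pvT1 n m l ∈ pvA1 L n (PySem.List.pyRange j n) s := by
    intro k
    induction k with
    | zero =>
      intro j s hk h1 h2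
      have hj : j = m := by omega
      subst hj
      rw [PySem.List.pyRange_one_cons (by omega)]
      unfold pvA1
      rw [if_neg (by omega), if_neg (by omega), if_neg (by omega)]
      exact pvA1_mono _ _ _ _ _ ((pv_mem_addfold _ _ _ _).mpr (Or.inr ⟨l, hl, hlb, rfl⟩))
    | succ k ih =>
      intro j s hk h1 h2
      have hjm : j < m := by omega
      rw [PySem.List.pyRange_one_cons (by omega)]
      unfold pvA1
      have hmono : 2 * j * n ≤ 2 * m * n := by nlinarith
      have hjsum : (n * n - j * j) + j * (2 * n + j) < L := by nlinarith
      rw [if_neg (by omega)]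
      split
      · exact ih _ _ (by omega) (by omega) (by omega)
      · split
        · exact ih _ _ (by omega) (by omega) (by omega)
        · exact ih _ _ (by omega) (by omega) (by omega)
  intro j s h1 h2
  exact key (m - j).toNat j s rfl h1 h2

theorem pvA2body_mono (L n : Int) (s : PySem.Set (Int × Int × Int)) (m : Int)
    (x : Int × Int × Int) (h : x ∈ s) : x ∈ pvA2body L n s m := by
  unfold pvA2body
  split
  · exact h
  · split
    · exact h
    · split
      · exact h
      · exact (pv_mem_addfold _ _ _ _).mpr (Or.inl h)

theorem pvA2body_sound (L n : Int) (s : PySem.Set (Int × Int × Int)) (m : Int)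
    (x : Int × Int × Int) (h : x ∈ pvA2body L n s m) :
    x ∈ s ∨ ∃ l,
      (n * n - m * m) + n * (2 * m - n) < L ∧ n * n - m * m ≤ n * (2 * m - n) ∧
      (Int.gcd m n : Int) = 1 ∧ 1 ≤ l ∧
      l ≤ PySem.Int.floordiv (L - 1) ((n * n - m * m) + n * (2 * m - n)) ∧ x = pvT2 n m l := by
  unfold pvA2body at h
  split at h
  · exact Or.inl h
  · split at h
    · exact Or.inl h
    · split at h
      · exact Or.inl h
      · rename_i hbr hxy hgcd
        rcases (pv_mem_addfold _ _ _ _).mp h with h | ⟨l, h1, h2, hx⟩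
        · exact Or.inl h
        · exact Or.inr ⟨l, by omega, by omega, by omega, h1, h2, by simpa [pvT2] using hx⟩

theorem pvA2body_complete (L n m l : Int)
    (hsum : (n * n - m * m) + n * (2 * m - n) < L)
    (hxy : n * n - m * m ≤ n * (2 * m - n))
    (hg : (Int.gcd m n : Int) = 1) (hl : 1 ≤ l)
    (hlb : l ≤ PySem.Int.floordiv (L - 1) ((n * n - m * m) + n * (2 * m - n))) :
    ∀ s, pvT2 n m l ∈ pvA2body L n s m := by
  intro s
  unfold pvA2body
  rw [if_neg (by omega), if_neg (by omega), if_neg (by omega)]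
  exact (pv_mem_addfold _ _ _ _).mpr (Or.inr ⟨l, hl, hlb, rfl⟩)

theorem pvAset1_mem (L : Int) (x : Int × Int × Int) : x ∈ pvAset1 L ↔
    ∃ n m l, 2 ≤ n ∧ n < Int.sqrt L ∧ 1 ≤ m ∧ m < n ∧ pvG1 L n m l ∧ x = pvT1 n m l := by
  unfold pvAset1
  constructor
  · intro h
    rcases pv_mem_foldl_elim _
        (fun n x => ∃ m ∈ PySem.List.pyRange 1 n, ∃ l,
          (n * n - m * m) + m * (2 * n + m) < L ∧ n * n - m * m ≤ m * (2 * n + m) ∧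
          (Int.gcd m n : Int) = 1 ∧ 1 ≤ l ∧
          l ≤ PySem.Int.floordiv (L - 1) ((n * n - m * m) + m * (2 * n + m)) ∧ x = pvT1 n m l)
        (fun s n x h => pvA1_sound _ _ _ _ _ h) _ _ _ h with h | ⟨n, hn, m, hm, l, c1, c2, c3, c4, c5, hx⟩
    · cases h
    · rcases PySem.List.mem_pyRange_one.mp hn with ⟨hn1, hn2⟩
      rcases PySem.List.mem_pyRange_one.mp hm with ⟨hm1, hm2⟩
      exact ⟨n, m, l, hn1, hn2, hm1, hm2, ⟨c1, c2, c3, c4, c5⟩, hx⟩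
  · rintro ⟨n, m, l, h2n, hns, hm1, hmn, ⟨c1, c2, c3, c4, c5⟩, hx⟩
    subst hx
    exact pv_mem_foldl_of (fun s n => pvA1 L n (PySem.List.pyRange 1 n) s) _ n
      (fun s n' h => pvA1_mono _ _ _ _ _ h)
      (fun s => pvA1_complete L n m l h2n hm1 hmn c1 c2 c3 c4 c5 1 s (le_refl 1) (by omega)) _ _
      (PySem.List.mem_pyRange_one.mpr ⟨h2n, hns⟩)

theorem pvAset_mem (L : Int) (x : Int × Int × Int) : x ∈ pvAset L ↔ pvMA L x := by
  unfold pvAset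
  constructor
  · intro h
    rcases pv_mem_foldl_elim _
        (fun n x => ∃ m ∈ PySem.List.pyRange (PySem.Int.floordiv n 2 + 1) n, ∃ l,
          (n * n - m * m) + n * (2 * m - n) < L ∧ n * n - m * m ≤ n * (2 * m - n) ∧
          (Int.gcd m n : Int) = 1 ∧ 1 ≤ l ∧
          l ≤ PySem.Int.floordiv (L - 1) ((n * n - m * m) + n * (2 * m - n)) ∧ x = pvT2 n m l)
        (fun s n x h => by
          rcases pv_mem_foldl_elim _ (fun m x => ∃ l,
              (n * n - m * m) + n * (2 * m - n) < L ∧ n * n - m * m ≤ n * (2 * m - n) ∧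
              (Int.gcd m n : Int) = 1 ∧ 1 ≤ l ∧
              l ≤ PySem.Int.floordiv (L - 1) ((n * n - m * m) + n * (2 * m - n)) ∧ x = pvT2 n m l)
            (fun s m x h => pvA2body_sound _ _ _ _ _ h) _ _ _ h with h | ⟨m, hm, hl⟩
          · exact Or.inl h
          · exact Or.inr ⟨m, hm, hl⟩) _ _ _ h with h | ⟨n, hn, m, hm, l, c1, c2, c3, c4, c5, hx⟩
    · exact Or.inl ((pvAset1_mem L x).mp h)
    · rcases PySem.List.mem_pyRange_one.mp hn with ⟨hn1, hn2⟩
      rcases PySem.List.mem_pyRange_one.mp hm with ⟨hm1, hm2⟩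
      exact Or.inr ⟨n, m, l, hn1, by omega, hm1, hm2, ⟨c1, c2, c3, c4, c5⟩, hx⟩
  · intro h
    have hmono : ∀ (s : PySem.Set (Int × Int × Int)) (n : Int), x ∈ s →
        x ∈ (PySem.List.pyRange (PySem.Int.floordiv n 2 + 1) n).foldl (pvA2body L n) s :=
      fun s n h => pv_mem_foldl_mono _ _ (fun s m h => pvA2body_mono _ _ _ _ _ h) _ _ h
    rcases h with ⟨n, m, l, h2n, hns, hm1, hmn, hg, hx⟩ | ⟨n, m, l, h2n, hns, hm1, hmn, ⟨c1, c2, c3, c4, c5⟩, hx⟩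
    · exact pv_mem_foldl_mono _ _ hmono _ _
        ((pvAset1_mem L x).mpr ⟨n, m, l, h2n, hns, hm1, hmn, hg, hx⟩)
    · subst hx
      exact pv_mem_foldl_of (fun s n => (PySem.List.pyRange (PySem.Int.floordiv n 2 + 1) n).foldl (pvA2body L n) s) _ n hmono
        (fun s => pv_mem_foldl_of (pvA2body L n) _ m (fun s m' h => pvA2body_mono _ _ _ _ _ h)
          (fun s => pvA2body_complete L n m l c1 c2 c3 c4 c5 s) _ _
          (PySem.List.mem_pyRange_one.mpr ⟨hm1, hmn⟩)) _ _
        (PySem.List.mem_pyRange_one.mpr ⟨h2n, by omega⟩)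

theorem pvA1_nodup (L n : Int) (ms : List Int) (s : PySem.Set (Int × Int × Int))
    (hs : s.Nodup) : (pvA1 L n ms s).Nodup := by
  induction ms generalizing s with
  | nil => exact hs
  | cons m ms ih =>
    unfold pvA1
    split
    · exact hs
    · split
      · exact ih _ hs
      · split
        · exact ih _ hs
        · exact ih _ (pv_nodup_addfold _ _ _ hs)

theorem pvA2body_nodup (L n : Int) (s : PySem.Set (Int × Int × Int)) (m : Int)
    (hs : s.Nodup) : (pvA2body L n s m).Nodup := by
  unfold pvA2body
  split
  · exact hs
  · split
    · exact hs
    · split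
      · exact hs
      · exact pv_nodup_addfold _ _ _ hs

theorem pvAset_nodup (L : Int) : (pvAset L).Nodup := by
  unfold pvAset
  refine pv_nodup_foldl _ (fun s n h => pv_nodup_foldl _ (fun s m h => pvA2body_nodup _ _ _ _ h) _ _ h) _ _ ?_
  exact pv_nodup_foldl _ (fun s n h => pvA1_nodup _ _ _ _ h) _ _ List.nodup_nil

-- ---------- B-side loop characterization ----------

theorem pvB1_mono (L n : Int) (ms : List Int) (s : PySem.Set (Int × Int × Int))
    (x : Int × Int × Int) (h : x ∈ s) : x ∈ pvB1 L n ms s := by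
  induction ms generalizing s with
  | nil => exact h
  | cons m ms ih =>
    unfold pvB1
    split
    · exact h
    · split
      · exact ih _ ((pv_mem_addfold _ _ _ _).mpr (Or.inl h))
      · exact ih _ h

theorem pvB1_sound (L n : Int) (ms : List Int) (s : PySem.Set (Int × Int × Int))
    (x : Int × Int × Int) (h : x ∈ pvB1 L n ms s) :
    x ∈ s ∨ ∃ m ∈ ms, ∃ l,
      n * n + 2 * m * n < L ∧ PySem.Int.mod (n - m) 3 ≠ 0 ∧ (Int.gcd m n : Int) = 1 ∧ 1 ≤ l ∧
      l ≤ PySem.Int.floordiv (L - 1) (n * n + 2 * m * n) ∧ x = pvTB n m l := by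
  induction ms generalizing s with
  | nil => exact Or.inl h
  | cons m ms ih =>
    unfold pvB1 at h
    split at h
    · exact Or.inl h
    · split at h
      · rename_i hbr hcond
        rcases ih _ h with h | ⟨m', hm', rest⟩
        · rcases (pv_mem_addfold _ _ _ _).mp h with h | ⟨l, h1, h2, hx⟩
          · exact Or.inl h
          · exact Or.inr ⟨m, List.mem_cons_self .., l, by omega, hcond.1, hcond.2, h1, h2,
              by simpa [pvTB] using hx⟩
        · exact Or.inr ⟨m', List.mem_cons_of_mem _ hm', rest⟩
      · rcases ih _ h with h | ⟨m', hm', rest⟩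
        · exact Or.inl h
        · exact Or.inr ⟨m', List.mem_cons_of_mem _ hm', rest⟩

theorem pvB1_complete (L n m l : Int) (h2n : 2 ≤ n) (hm1 : 1 ≤ m) (hmn : m < n)
    (hsum : n * n + 2 * m * n < L)
    (hmod : PySem.Int.mod (n - m) 3 ≠ 0)
    (hg : (Int.gcd m n : Int) = 1) (hl : 1 ≤ l)
    (hlb : l ≤ PySem.Int.floordiv (L - 1) (n * n + 2 * m * n)) :
    ∀ (j : Int) (s : PySem.Set (Int × Int × Int)), 1 ≤ j → j ≤ m →
      pvTB n m l ∈ pvB1 L n (PySem.List.pyRange j n) s := by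
  have key : ∀ (k : Nat) (j : Int) (s : PySem.Set (Int × Int × Int)), (m - j).toNat = k →
      1 ≤ j → j ≤ m → pvTB n m l ∈ pvB1 L n (PySem.List.pyRange j n) s := by
    intro k
    induction k with
    | zero =>
      intro j s hk h1 h2
      have hj : j = m := by omega
      subst hj
      rw [PySem.List.pyRange_one_cons (by omega)]
      unfold pvB1
      rw [if_neg (by omega), if_pos ⟨hmod, hg⟩]
      exact pvB1_mono _ _ _ _ _ ((pv_mem_addfold _ _ _ _).mpr (Or.inr ⟨l, hl, hlb, rfl⟩))
    | succ k ih =>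
      intro j s hk h1 h2
      have hjm : j < m := by omega
      rw [PySem.List.pyRange_one_cons (by omega)]
      unfold pvB1
      have hmono : 2 * j * n ≤ 2 * m * n := by nlinarith
      rw [if_neg (by omega)]
      split
      · exact ih _ _ (by omega) (by omega) (by omega)
      · exact ih _ _ (by omega) (by omega) (by omega)
  intro j s h1 h2
  exact key (m - j).toNat j s rfl h1 h2

theorem pvB1_nodup (L n : Int) (ms : List Int) (s : PySem.Set (Int × Int × Int))
    (hs : s.Nodup) : (pvB1 L n ms s).Nodup := by
  induction ms generalizing s with
  | nil => exact hs
  | cons m ms ih =>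
    unfold pvB1
    split
    · exact hs
    · split
      · exact ih _ (pv_nodup_addfold _ _ _ hs)
      · exact ih _ hs

theorem pvBmain_mono (L n : Int) (s : PySem.Set (Int × Int × Int))
    (x : Int × Int × Int) (h : x ∈ s) : x ∈ pvBmain L n s := by
  induction n, s using pvBmain.induct L with
  | case1 n s hcond ih =>
    rw [pvBmain, if_pos hcond]
    exact ih (pvB1_mono _ _ _ _ _ h)
  | case2 n s hcond =>
    rw [pvBmain, if_neg hcond]
    exact h

theorem pvBmain_sound (L n : Int) (s : PySem.Set (Int × Int × Int))
    (x : Int × Int × Int) (h : x ∈ pvBmain L n s) :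
    x ∈ s ∨ ∃ n' m l, n ≤ n' ∧ m ∈ PySem.List.pyRange 1 n' ∧
      n' * n' + 2 * m * n' < L ∧ PySem.Int.mod (n' - m) 3 ≠ 0 ∧ (Int.gcd m n' : Int) = 1 ∧ 1 ≤ l ∧
      l ≤ PySem.Int.floordiv (L - 1) (n' * n' + 2 * m * n') ∧ x = pvTB n' m l := by
  induction n, s using pvBmain.induct L generalizing x with
  | case1 n s hcond ih =>
    rw [pvBmain, if_pos hcond] at h
    rcases ih _ h with h | ⟨n', m, l, hn', rest⟩
    · rcases pvB1_sound _ _ _ _ _ h with h | ⟨m, hm, l, rest⟩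
      · exact Or.inl h
      · exact Or.inr ⟨n, m, l, le_refl n, hm, rest⟩
    · exact Or.inr ⟨n', m, l, by omega, rest⟩
  | case2 n s hcond =>
    rw [pvBmain, if_neg hcond] at h
    exact Or.inl h

theorem pvBmain_complete (L n0 m l : Int) (hm1 : 1 ≤ m) (hmn : m < n0)
    (hsum : n0 * n0 + 2 * m * n0 < L)
    (hmod : PySem.Int.mod (n0 - m) 3 ≠ 0)
    (hg : (Int.gcd m n0 : Int) = 1) (hl : 1 ≤ l)
    (hlb : l ≤ PySem.Int.floordiv (L - 1) (n0 * n0 + 2 * m * n0)) :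
    ∀ (n : Int) (s : PySem.Set (Int × Int × Int)), 2 ≤ n → n ≤ n0 →
      pvTB n0 m l ∈ pvBmain L n s := by
  have key : ∀ (k : Nat) (n : Int) (s : PySem.Set (Int × Int × Int)), (n0 - n).toNat = k →
      2 ≤ n → n ≤ n0 → pvTB n0 m l ∈ pvBmain L n s := by
    intro k
    induction k with
    | zero =>
      intro n s hk h2 hle
      have hn : n = n0 := by omega
      subst hn
      have hcond : n * n + 2 * n < L := by nlinarith
      rw [pvBmain, if_pos hcond]
      exact pvBmain_mono _ _ _ _
        (pvB1_complete L n m l (by omega) hm1 hmn hsum hmod hg hl hlb 1 s (by omega) (by omega))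
    | succ k ih =>
      intro n s hk h2 hle
      have hlt : n < n0 := by omega
      have hcond : n * n + 2 * n < L := by nlinarith
      rw [pvBmain, if_pos hcond]
      exact ih _ _ (by omega) (by omega) (by omega)
  intro n s h2 hle
  exact key (n0 - n).toNat n s rfl h2 hle

theorem pvBmain_nodup (L n : Int) (s : PySem.Set (Int × Int × Int)) (hs : s.Nodup) :
    (pvBmain L n s).Nodup := by
  induction n, s using pvBmain.induct L with
  | case1 n s hcond ih =>
    rw [pvBmain, if_pos hcond]
    exact ih (pvB1_nodup _ _ _ _ hs)
  | case2 n s hcond =>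
    rw [pvBmain, if_neg hcond]
    exact hs

theorem pvBset_mem (L : Int) (x : Int × Int × Int) : x ∈ pvBset L ↔ pvMB L x := by
  constructor
  · intro h
    rcases pvBmain_sound _ _ _ _ h with h | ⟨n, m, l, _, hm, rest⟩
    · cases h
    · rcases PySem.List.mem_pyRange_one.mp hm with ⟨h1, h2⟩
      exact ⟨n, m, l, h1, h2, ⟨rest.1, rest.2.1, rest.2.2.1, rest.2.2.2.1, rest.2.2.2.2.1⟩,
        rest.2.2.2.2.2⟩
  · rintro ⟨n, m, l, hm1, hmn, ⟨hsum, hmod, hg, hl, hlb⟩, hx⟩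
    subst hx
    exact pvBmain_complete L n m l hm1 hmn hsum hmod hg hl hlb 2 _ (le_refl 2) (by omega)

theorem pvBset_nodup (L : Int) : (pvBset L).Nodup :=
  pvBmain_nodup L 2 _ List.nodup_nil

-- ---------- soundness: generated triples satisfy pvSP ----------

theorem pvSP_of_G1 (L n m l : Int) (h2n : 2 ≤ n) (hm1 : 1 ≤ m) (hmn : m < n)
    (hg : pvG1 L n m l) : pvSP L (pvT1 n m l) := by
  obtain ⟨c1, c2, c3, c4, c5⟩ := hg
  have hx1 : 1 ≤ n * n - m * m := by nlinarith
  have hy1 : 1 ≤ m * (2 * n + m) := by nlinarith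
  have hs0 : 0 < (n * n - m * m) + m * (2 * n + m) := by omega
  have hc5 : l * ((n * n - m * m) + m * (2 * n + m)) ≤ L - 1 := (pv_le_floordiv_iff hs0).mp c5
  have hz0 : 0 ≤ m * m + n * n + m * n := by nlinarith
  unfold pvSP pvT1
  dsimp only
  refine ⟨by nlinarith, by nlinarith, by nlinarith, by nlinarith, by ring⟩

theorem pvSP_of_G2 (L n m l : Int) (h2n : 2 ≤ n) (hm : PySem.Int.floordiv n 2 + 1 ≤ m)
    (hmn : m < n) (hg : pvG2 L n m l) : pvSP L (pvT2 n m l) := by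
  obtain ⟨c1, c2, c3, c4, c5⟩ := hg
  rw [pv_floordiv_pos_den n 2 (by omega)] at hm
  have hm1 : 1 ≤ m := by omega
  have h2m : n < 2 * m := by omega
  have hx1 : 1 ≤ n * n - m * m := by nlinarith
  have hy1 : 1 ≤ n * (2 * m - n) := by nlinarith
  have hs0 : 0 < (n * n - m * m) + n * (2 * m - n) := by omega
  have hc5 : l * ((n * n - m * m) + n * (2 * m - n)) ≤ L - 1 := (pv_le_floordiv_iff hs0).mp c5
  have hz0 : 0 ≤ m * m + n * n - m * n := by nlinarith [sq_nonneg (m - n)]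
  unfold pvSP pvT2
  dsimp only
  refine ⟨by nlinarith, by nlinarith, by nlinarith, by nlinarith, by ring⟩

theorem pvSP_of_GB (L n m l : Int) (hm1 : 1 ≤ m) (hmn : m < n)
    (hg : pvGB L n m l) : pvSP L (pvTB n m l) := by
  obtain ⟨c1, c2, c3, c4, c5⟩ := hg
  have hx1 : 1 ≤ n * n - m * m := by nlinarith
  have hy1 : 1 ≤ 2 * m * n + m * m := by nlinarith
  have hs0 : 0 < n * n + 2 * m * n := by nlinarith
  have hc5 : l * (n * n + 2 * m * n) ≤ L - 1 := (pv_le_floordiv_iff hs0).mp c5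
  have hz0 : 0 ≤ n * n + m * n + m * m := by nlinarith
  have hmm : min (n * n - m * m) (2 * m * n + m * m) + max (n * n - m * m) (2 * m * n + m * m)
      = n * n + 2 * m * n := by rw [min_add_max]; ring
  have h1min : 1 ≤ min (n * n - m * m) (2 * m * n + m * m) := le_min hx1 hy1
  have hminmax : min (n * n - m * m) (2 * m * n + m * m) ≤ max (n * n - m * m) (2 * m * n + m * m) :=
    min_le_max
  unfold pvSP pvTB
  dsimp only
  refine ⟨by nlinarith, mul_le_mul_of_nonneg_right hminmax (by omega), by nlinarith, by nlinarith, ?_⟩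
  rcases le_total (n * n - m * m) (2 * m * n + m * m) with hle | hle
  · rw [min_eq_left hle, max_eq_right hle]; ring
  · rw [min_eq_right hle, max_eq_left hle]; ring

-- ---------- the classification core ----------

theorem pv_mod3_iff (a : Int) : PySem.Int.mod a 3 = 0 ↔ (3:Int) ∣ a := by
  unfold PySem.Int.mod
  rw [Int.fmod_eq_emod]
  omega

theorem pv_zmod9 : ∀ x y s : ZMod 9, x * x + x * y + y * y = 3 * s * (3 * s) →
    3 * x = 0 ∧ 3 * y = 0 := by decide

theorem pv_three_not_dvd (p q r : Int) (hcop : Int.gcd p q = 1)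
    (heqp : p * p + p * q + q * q = r * r) : ¬ (3:Int) ∣ r := by
  rintro ⟨s, hs⟩
  have hcast : ((p : ZMod 9)) * p + p * q + q * q = 3 * (s : ZMod 9) * (3 * s) := by
    have h1 : ((p * p + p * q + q * q : Int) : ZMod 9) = ((3 * s * (3 * s) : Int) : ZMod 9) := by
      rw [heqp, hs]
    push_cast at h1
    exact h1
  obtain ⟨h3p, h3q⟩ := pv_zmod9 _ _ _ hcast
  have hp : (3:Int) ∣ p := by
    have : ((3 * p : Int) : ZMod 9) = 0 := by push_cast; exact h3p
    have := (ZMod.intCast_zmod_eq_zero_iff_dvd (3 * p) 9).mp this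
    omega
  have hq : (3:Int) ∣ q := by
    have : ((3 * q : Int) : ZMod 9) = 0 := by push_cast; exact h3q
    have := (ZMod.intCast_zmod_eq_zero_iff_dvd (3 * q) 9).mp this
    omega
  have h3 : (3:Nat) ∣ Int.gcd p q := Int.dvd_gcd (by exact_mod_cast hp) (by exact_mod_cast hq)
  rw [hcop] at h3
  omega

-- helper: a positive multiple of a positive number has a positive cofactor
theorem pv_pos_factor {G x v : Int} (hG : 0 < G) (hv : 1 ≤ v) (h : v = G * x) : 1 ≤ x := by
  rcases le_or_gt x 0 with hx | hx
  · have : G * x ≤ 0 := mul_nonpos_iff.mpr (Or.inl ⟨le_of_lt hG, hx⟩)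
    omega
  · omega

set_option maxHeartbeats 1000000 in
theorem pv_core (L a b c : Int) (h1 : 1 ≤ a) (hab : a ≤ b) (hsum : a + b < L) (hc : 0 ≤ c)
    (heq : c * c = a * a + a * b + b * b) :
    ∃ m n l, 1 ≤ m ∧ m < n ∧ (Int.gcd m n : Int) = 1 ∧ ¬ ((3:Int) ∣ (n - m)) ∧ 1 ≤ l ∧
      l * (n * n + 2 * m * n) ≤ L - 1 ∧ c = (n * n + m * n + m * m) * l ∧
      ((a = (n * n - m * m) * l ∧ b = (2 * m * n + m * m) * l) ∨
       (a = (2 * m * n + m * m) * l ∧ b = (n * n - m * m) * l)) := by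
  have hb1 : 1 ≤ b := le_trans h1 hab
  -- primitive part: a = G p, b = G q, c = G r with gcd p q = 1
  have hgposN : 0 < Int.gcd a b := Int.gcd_pos_of_ne_zero_left b (by omega)
  have hgpos : 0 < (Int.gcd a b : Int) := by exact_mod_cast hgposN
  obtain ⟨p, hpa⟩ := Int.gcd_dvd_left a b
  obtain ⟨q, hqb⟩ := Int.gcd_dvd_right a b
  set G : Int := (Int.gcd a b : Int) with hGdef
  have hp1 : 1 ≤ p := pv_pos_factor hgpos h1 hpa
  have hq1 : 1 ≤ q := pv_pos_factor hgpos hb1 hqb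
  have hpq : p ≤ q := le_of_mul_le_mul_left (by rw [← hpa, ← hqb]; exact hab) hgpos
  have hcopq : Int.gcd p q = 1 := by
    have hp' : p = a / G := by rw [hpa, Int.mul_ediv_cancel_left _ (ne_of_gt hgpos)]
    have hq' : q = b / G := by rw [hqb, Int.mul_ediv_cancel_left _ (ne_of_gt hgpos)]
    rw [hp', hq']
    exact Int.gcd_div_gcd_div_gcd hgposN
  have hGc : G ∣ c := by
    refine (Int.pow_dvd_pow_iff (n := 2) (by norm_num)).mp ?_
    rw [pow_two, pow_two]
    exact ⟨p * p + p * q + q * q, by rw [heq, hpa, hqb]; ring⟩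
  obtain ⟨r, hcr⟩ := hGc
  have hr0 : 0 ≤ r := by
    rcases le_or_gt 0 r with h | h
    · exact h
    · have : G * r < 0 := mul_neg_of_pos_of_neg hgpos h
      omega
  have heqp : p * p + p * q + q * q = r * r := by
    have h2 : (G * G) * (p * p + p * q + q * q) = (G * G) * (r * r) := by
      have := heq
      rw [hpa, hqb, hcr] at this
      linear_combination - this
    exact mul_left_cancel₀ (by positivity) h2
  have hr1 : 1 ≤ r := by nlinarith
  have hcop_pr : IsCoprime r p := by
    have hIC : IsCoprime p q := Int.isCoprime_iff_gcd_eq_one.mpr hcopq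
    have hd_p : (Int.gcd p r : Int) ∣ p := Int.gcd_dvd_left p r
    have hd_r : (Int.gcd p r : Int) ∣ r := Int.gcd_dvd_right p r
    have hqq : (Int.gcd p r : Int) ∣ q * q := by
      have e : q * q = r * r - p * p - p * q := by linear_combination heqp
      rw [e]
      exact dvd_sub (dvd_sub (hd_r.mul_left r) (hd_p.mul_left p)) (hd_p.mul_right q)
    obtain ⟨u, v, huv⟩ := hIC.mul_right hIC
    have hgd : (Int.gcd p r : Int) ∣ 1 := huv ▸ dvd_add (hd_p.mul_left u) (hqq.mul_left v)
    have h1' : Int.gcd p r = 1 := by exact_mod_cast Int.eq_one_of_dvd_one (by positivity) hgd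
    exact (Int.isCoprime_iff_gcd_eq_one.mpr h1').symm
  -- m, n from the slope q / (p + r) in lowest terms
  have hg2N : 0 < Int.gcd q (p + r) := Int.gcd_pos_of_ne_zero_left (p + r) (by omega)
  have hg2 : 0 < (Int.gcd q (p + r) : Int) := by exact_mod_cast hg2N
  obtain ⟨m, hqm⟩ := Int.gcd_dvd_left q (p + r)
  obtain ⟨n, hpn⟩ := Int.gcd_dvd_right q (p + r)
  set G2 : Int := (Int.gcd q (p + r) : Int) with hG2def
  have hm1 : 1 ≤ m := pv_pos_factor hg2 hq1 hqm
  have hn1 : 1 ≤ n := pv_pos_factor hg2 (by omega) hpn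
  have hcmn : Int.gcd m n = 1 := by
    have hm' : m = q / G2 := by rw [hqm, Int.mul_ediv_cancel_left _ (ne_of_gt hg2)]
    have hn' : n = (p + r) / G2 := by rw [hpn, Int.mul_ediv_cancel_left _ (ne_of_gt hg2)]
    rw [hm', hn']
    exact Int.gcd_div_gcd_div_gcd hg2N
  have hqn : q * n = (p + r) * m := by rw [hqm, hpn]; ring
  have hE : r * (n * n - m * m) = p * (n * n + m * n + m * m) := by
    have h0 : (p + r) * (r * (n * n - m * m) - p * (n * n + m * n + m * m)) = 0 := by
      linear_combination (-(n * n)) * heqp + (p * n + q * n + (p + r) * m) * hqn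
    rcases mul_eq_zero.mp h0 with h | h
    · omega
    · linarith
  have hq2 : q * (n * n + m * n + m * m) = r * (m * (2 * n + m)) := by
    have h0 : n * (q * (n * n + m * n + m * m) - r * (m * (2 * n + m))) = 0 := by
      linear_combination (n * n + m * n + m * m) * hqn - m * hE
    rcases mul_eq_zero.mp h0 with h | h
    · omega
    · linarith
  have hrD : r ∣ (n * n + m * n + m * m) := by
    refine hcop_pr.dvd_of_dvd_mul_right ⟨n * n - m * m, by linear_combination - hE⟩
  obtain ⟨k, hkD⟩ := hrD
  have hD3 : 0 < n * n + m * n + m * m := by nlinarith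
  have hk1 : 1 ≤ k := pv_pos_factor (show (0:Int) < r by omega)
    (show (1:Int) ≤ n * n + m * n + m * m by omega) hkD
  have hkp : k * p = n * n - m * m := by
    have h0 : r * ((n * n - m * m) - k * p) = 0 := by linear_combination hE + p * hkD
    rcases mul_eq_zero.mp h0 with h | h
    · omega
    · linarith
  have hkq : k * q = m * (2 * n + m) := by
    have h0 : r * (k * q - m * (2 * n + m)) = 0 := by linear_combination hq2 - q * hkD
    rcases mul_eq_zero.mp h0 with h | h
    · omega
    · linarith
  have hmn : m < n := by
    have h11 : 1 * 1 ≤ k * p := mul_le_mul hk1 hp1 (by norm_num) (by omega)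
    have hmm : m * m < n * n := by omega
    rcases le_or_gt n m with hcon | hgood
    · have : n * n ≤ m * m := mul_le_mul hcon hcon (by omega) (by omega)
      omega
    · exact hgood
  have hICmn : IsCoprime m n := Int.isCoprime_iff_gcd_eq_one.mpr hcmn
  have hcop_km : IsCoprime k m := by
    have hd_k : (Int.gcd k m : Int) ∣ k := Int.gcd_dvd_left k m
    have hd_m : (Int.gcd k m : Int) ∣ m := Int.gcd_dvd_right k m
    have hnn : (Int.gcd k m : Int) ∣ n * n := by
      have e : n * n = k * p + m * m := by linear_combination - hkp
      rw [e]
      exact dvd_add (hd_k.mul_right p) (hd_m.mul_left m)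
    obtain ⟨u, v, huv⟩ := hICmn.mul_right hICmn
    have hgd : (Int.gcd k m : Int) ∣ 1 := huv ▸ dvd_add (hd_m.mul_left u) (hnn.mul_left v)
    have h1' : Int.gcd k m = 1 := by exact_mod_cast Int.eq_one_of_dvd_one (by positivity) hgd
    exact Int.isCoprime_iff_gcd_eq_one.mpr h1'
  have hcop_kn : IsCoprime k n := by
    have hd_k : (Int.gcd k n : Int) ∣ k := Int.gcd_dvd_left k n
    have hd_n : (Int.gcd k n : Int) ∣ n := Int.gcd_dvd_right k n
    have hmm : (Int.gcd k n : Int) ∣ m * m := by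
      have e : m * m = n * n - k * p := by linear_combination hkp
      rw [e]
      exact dvd_sub (hd_n.mul_left n) (hd_k.mul_right p)
    obtain ⟨u, v, huv⟩ := hICmn.symm.mul_right hICmn.symm
    have hgd : (Int.gcd k n : Int) ∣ 1 := huv ▸ dvd_add (hd_n.mul_left u) (hmm.mul_left v)
    have h1' : Int.gcd k n = 1 := by exact_mod_cast Int.eq_one_of_dvd_one (by positivity) hgd
    exact Int.isCoprime_iff_gcd_eq_one.mpr h1'
  have hk_n2m : k ∣ n + 2 * m := by
    refine hcop_kn.dvd_of_dvd_mul_left ⟨p + q, by linear_combination (-1 : Int) * hkp - hkq⟩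
  have hk3 : k ∣ 3 := by
    have hkD3 : k ∣ 3 * (m * m) := by
      have e : 3 * (m * m) = (n * n + m * n + m * m) - (n + 2 * m) * (n - m) := by ring
      rw [e]
      exact dvd_sub ⟨r, by rw [hkD]; ring⟩ (hk_n2m.mul_right _)
    exact (hcop_km.mul_right hcop_km).dvd_of_dvd_mul_right hkD3
  have hk13 : k = 1 ∨ k = 3 := by
    have hk3' : k ≤ 3 := Int.le_of_dvd (by norm_num) hk3
    interval_cases k
    · exact Or.inl rfl
    · exfalso; omega
    · exact Or.inr rfl
  have hG1 : 1 ≤ G := hgpos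
  have habL : a + b ≤ L - 1 := by omega
  rcases hk13 with hk | hk
  · -- k = 1 : Case-1 orientation with (m, n)
    subst hk
    have hp' : p = n * n - m * m := by linarith [hkp]
    have hq' : q = 2 * m * n + m * m := by linear_combination hkq
    have hr' : r = n * n + m * n + m * m := by linarith [hkD]
    refine ⟨m, n, G, hm1, hmn, by exact_mod_cast hcmn, ?_, hG1, ?_, ?_, Or.inl ⟨?_, ?_⟩⟩
    · rintro ⟨t, ht⟩
      exact pv_three_not_dvd p q r hcopq heqp
        ⟨m * m + 3 * m * t + 3 * t * t, by linear_combination hr' + (n + 2 * m + 3 * t) * ht⟩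
    · have : G * (p + q) = a + b := by rw [hpa, hqb]; ring
      nlinarith
    · rw [hcr, hr']; ring
    · rw [hpa, hp']; ring
    · rw [hqb, hq']; ring
  · -- k = 3 : swapped orientation with (w - m, w) where n + 2m = 3w
    subst hk
    obtain ⟨w, hw⟩ := hk_n2m
    have hn' : n = 3 * w - 2 * m := by omega
    have hq' : q = 2 * m * w - m * m := by
      have h3q : 3 * q = 6 * m * w - 3 * (m * m) := by linear_combination hkq + 2 * m * hw
      linarith
    have hp' : p = 3 * (w * w) - 4 * m * w + m * m := by
      have h3p : 3 * p = 9 * (w * w) - 12 * m * w + 3 * (m * m) := by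
        linear_combination hkp + (n + 3 * w - 2 * m) * hn'
      linarith
    have hr' : r = 3 * (w * w) - 3 * m * w + m * m := by
      have h3r : 3 * r = 9 * (w * w) - 9 * m * w + 3 * (m * m) := by
        linear_combination (-1 : Int) * hkD + (n + 3 * w - m) * hn'
      linarith
    have hwm1 : 1 ≤ w - m := by omega
    have hgwm : Int.gcd (w - m) w = 1 := by
      have hd_wm : (Int.gcd (w - m) w : Int) ∣ w - m := Int.gcd_dvd_left _ _
      have hd_w : (Int.gcd (w - m) w : Int) ∣ w := Int.gcd_dvd_right _ _
      have hd_m : (Int.gcd (w - m) w : Int) ∣ m := by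
        simpa using dvd_sub hd_w hd_wm
      have hd_n : (Int.gcd (w - m) w : Int) ∣ n := by
        rw [hn']
        exact dvd_sub (hd_w.mul_left 3) (hd_m.mul_left 2)
      have : (Int.gcd (w - m) w) ∣ Int.gcd m n := Int.dvd_gcd hd_m hd_n
      rw [hcmn] at this
      exact Nat.dvd_one.mp this
    refine ⟨w - m, w, G, hwm1, by omega, by exact_mod_cast hgwm, ?_, hG1, ?_, ?_, Or.inr ⟨?_, ?_⟩⟩
    · rintro ⟨t, ht⟩
      have h3m : (3:Int) ∣ m := ⟨t, by omega⟩
      have h3n : (3:Int) ∣ n := ⟨w - 2 * t, by omega⟩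
      have : (3:Nat) ∣ Int.gcd m n := Int.dvd_gcd (by exact_mod_cast h3m) (by exact_mod_cast h3n)
      rw [hcmn] at this
      omega
    · have : G * (p + q) = a + b := by rw [hpa, hqb]; ring
      nlinarith
    · rw [hcr, hr']; ring
    · rw [hpa, hp']; ring
    · rw [hqb, hq']; ring



-- ---------- completeness: pvSP triples are produced by both programs ----------

theorem pvSP_to_B (L : Int) (x : Int × Int × Int) (h : pvSP L x) : pvMB L x := by
  obtain ⟨a, b, c⟩ := x
  obtain ⟨h1, hab, hsum, hc, heq⟩ := h
  obtain ⟨m, n, l, hm1, hmn, hg, h3, hl, hlb, hcEq, hor⟩ :=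
    pv_core L a b c h1 hab hsum hc heq
  have hs0 : 0 < n * n + 2 * m * n := by nlinarith
  have hsumL : n * n + 2 * m * n < L := by nlinarith
  have hmod : PySem.Int.mod (n - m) 3 ≠ 0 := fun hmod => h3 ((pv_mod3_iff _).mp hmod)
  refine ⟨n, m, l, hm1, hmn, ⟨hsumL, hmod, hg, hl, (pv_le_floordiv_iff hs0).mpr hlb⟩, ?_⟩
  have hx1 : 1 ≤ n * n - m * m := by nlinarith
  rcases hor with ⟨ha, hb⟩ | ⟨ha, hb⟩
  · have hle : n * n - m * m ≤ 2 * m * n + m * m := by nlinarith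
    rw [pvTB, min_eq_left hle, max_eq_right hle]
    exact Prod.ext ha (Prod.ext hb hcEq)
  · have hle : 2 * m * n + m * m ≤ n * n - m * m := by nlinarith
    rw [pvTB, min_eq_right hle, max_eq_left hle]
    exact Prod.ext ha (Prod.ext hb hcEq)

theorem pvSP_to_A (L : Int) (x : Int × Int × Int) (h : pvSP L x) : pvMA L x := by
  obtain ⟨a, b, c⟩ := x
  obtain ⟨h1, hab, hsum, hc, heq⟩ := h
  obtain ⟨m, n, l, hm1, hmn, hg, h3, hl, hlb, hcEq, hor⟩ :=
    pv_core L a b c h1 hab hsum hc heq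
  have hs0 : 0 < n * n + 2 * m * n := by nlinarith
  have hsumL : n * n + 2 * m * n ≤ L - 1 := by nlinarith
  rcases hor with ⟨ha, hb⟩ | ⟨ha, hb⟩
  · -- x0 ≤ y0 : produced by Case 1 with (m, n)
    have hle : n * n - m * m ≤ 2 * m * n + m * m := by nlinarith
    refine Or.inl ⟨n, m, l, by omega, ?_, hm1, hmn, ⟨by nlinarith, by nlinarith, hg, hl, ?_⟩, ?_⟩
    · have hsq : (n + 1) * (n + 1) ≤ L := by nlinarith
      have := le_sqrt_of_sq_le (x := n + 1) (by omega) hsq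
      omega
    · rw [pv_le_floordiv_iff (by nlinarith)]
      nlinarith
    · rw [pvT1, ha, hb, hcEq]
      refine Prod.ext (by ring) (Prod.ext (by ring) (by ring))
  · -- y0 ≤ x0 : produced by Case 2 with (n, m + n)
    have hle : 2 * m * n + m * m ≤ n * n - m * m := by nlinarith
    have hgc : (Int.gcd n (m + n) : Int) = 1 := by
      rw [Int.gcd_add_self_right, Int.gcd_comm]; exact hg
    refine Or.inr ⟨m + n, n, l, by omega, ?_, ?_, by omega, ⟨by nlinarith, by nlinarith, hgc, hl, ?_⟩, ?_⟩
    · rw [pv_floordiv_pos_den _ _ (by omega)]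
      refine le_sqrt_of_sq_le (by omega) ?_
      rw [Int.le_ediv_iff_mul_le (by omega)]
      nlinarith [(n + 3 * m) * (n - m)]
    · rw [pv_floordiv_pos_den _ _ (by omega)]
      omega
    · rw [pv_le_floordiv_iff (by nlinarith)]
      nlinarith
    · rw [pvT2, ha, hb, hcEq]
      refine Prod.ext (by ring) (Prod.ext (by ring) (by ring))

theorem pvMA_to_SP (L : Int) (x : Int × Int × Int) (h : pvMA L x) : pvSP L x := by
  rcases h with ⟨n, m, l, h2n, _, hm1, hmn, hg, hx⟩ | ⟨n, m, l, h2n, _, hm, hmn, hg, hx⟩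
  · subst hx; exact pvSP_of_G1 L n m l h2n hm1 hmn hg
  · subst hx; exact pvSP_of_G2 L n m l h2n hm hmn hg

theorem pvMB_to_SP (L : Int) (x : Int × Int × Int) (h : pvMB L x) : pvSP L x := by
  rcases h with ⟨n, m, l, hm1, hmn, hg, hx⟩
  subst hx; exact pvSP_of_GB L n m l hm1 hmn hg

-- ---------- glue ----------

theorem pvKey_inj : Function.Injective pvKey := by
  intro t u h
  unfold pvKey at h
  have h1 := toLex.injective h
  have h2 := Prod.ext_iff.mp h1
  have h3 := Prod.ext_iff.mp (toLex.injective h2.2)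
  exact Prod.ext h2.1 (Prod.ext h3.1 h3.2)

theorem pv_main (L : Int) :
    search_pseudo_pythagorean_triples L = search_pseudo_pythagorean_triples_alt L := by
  unfold search_pseudo_pythagorean_triples search_pseudo_pythagorean_triples_alt
  refine PySem.List.sorted_eq_sorted_of_perm _ _ pvKey pvKey_inj ?_
  refine (List.perm_ext_iff_of_nodup (pvAset_nodup L) (pvBset_nodup L)).mpr ?_
  intro x
  rw [pvAset_mem, pvBset_mem]
  exact ⟨fun h => pvSP_to_B L x (pvMA_to_SP L x h), fun h => pvSP_to_A L x (pvMB_to_SP L x h)⟩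

-- ===== VERDICT (by name: the statement is the Claim_ definition above) =====
theorem search_pseudo_pythagorean_triples_spec : Claim_equal_search_pseudo_pythagorean_triples := by
  intro L _ _
  unfold Spec_search_pseudo_pythagorean_triples
  exact pv_main L
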